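-- pv_equiv track=rewrite | github.com/Parshad-Patel/BlogContentAnalyzer | main.py | Count_personal_pronouns
-- ===== SOURCE A (Python) =====
-- def Count_personal_pronouns(tokenized_words):
--     pronouns = ["I", "we", "my", "ours", "us"]
--     count = 0
--     for i in range(len(tokenized_words)):
--         word = tokenized_words[i]
--         if word in pronouns:
--             if word == "us" and i > 0 and tokenized_words[i - 1].lower() not in ["the", "in"]:
--                 count += 1
--             elif word != "us":
--                 count += 1
--     return count
-- ===== SOURCE B (Python) =====
-- def Count_personal_pronouns(tokenized_words):
--     PRONOUNS = ("I", "we", "my", "ours", "us")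
--     total = sum(1 for w in tokenized_words if w in PRONOUNS)
--     disqualified = sum(
--         1 for i, w in enumerate(tokenized_words)
--         if w == "us" and (i == 0 or tokenized_words[i - 1].lower() in ("the", "in")))
--     return total - disqualified
-- ===== Notes on version B (the rewrite author's own statement) =====
-- stated objective: alternative
-- what changed: Replaces A's single branching index loop by two separate non-branching passes combined arithmetically: count every pronoun token, then subtract the count of disqualified 'us' tokens (index 0 or preceded by 'the'/'in' case-insensitively).
import Mathlib
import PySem

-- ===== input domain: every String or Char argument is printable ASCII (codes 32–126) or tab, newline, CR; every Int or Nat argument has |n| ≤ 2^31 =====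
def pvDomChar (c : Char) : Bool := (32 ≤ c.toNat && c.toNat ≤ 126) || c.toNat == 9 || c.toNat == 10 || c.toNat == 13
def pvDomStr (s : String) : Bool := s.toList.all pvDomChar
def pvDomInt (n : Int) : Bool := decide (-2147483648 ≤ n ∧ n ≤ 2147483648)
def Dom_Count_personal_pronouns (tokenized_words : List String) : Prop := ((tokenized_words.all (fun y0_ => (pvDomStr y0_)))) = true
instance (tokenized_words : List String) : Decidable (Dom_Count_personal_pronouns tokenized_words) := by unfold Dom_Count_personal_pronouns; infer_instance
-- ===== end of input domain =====

-- B counts pronouns in one pass and subtracts disqualified 'us' tokens in a second pass,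
-- instead of A's single branching index loop; return values are proved equal (alternative decomposition).


-- ===== PORT A =====
-- tokenized_words[i] with 0 ≤ i < len is always in range, so pyGetD with default "" is exact.
def Count_personal_pronouns (tokenized_words : List String) : Int :=
  let pronouns : List String := ["I", "we", "my", "ours", "us"]
  (PySem.List.pyRange 0 (PySem.List.len tokenized_words) 1).foldl
    (fun count i =>
      let word := PySem.List.pyGetD tokenized_words i ""
      if word ∈ pronouns then
        if word = "us" ∧ i > 0 ∧
            PySem.Str.lower (PySem.List.pyGetD tokenized_words (i - 1) "") ∉ (["the", "in"] : List String) then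
          count + 1
        else if word ≠ "us" then count + 1
        else count
      else count) 0

-- ===== PORT B =====
def Count_personal_pronouns_alt (tokenized_words : List String) : Int :=
  let pronouns : List String := ["I", "we", "my", "ours", "us"]
  let total : Int := tokenized_words.foldl (fun c w => if w ∈ pronouns then c + 1 else c) 0
  let disqualified : Int := (PySem.List.enumerate tokenized_words 0).foldl
    (fun c p =>
      if p.2 = "us" ∧ (p.1 = 0 ∨
          PySem.Str.lower (PySem.List.pyGetD tokenized_words (p.1 - 1) "") ∈ (["the", "in"] : List String)) then
        c + 1
      else c) 0
  total - disqualified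

-- ===== PRECONDITION & SPEC =====
def Spec_Count_personal_pronouns (tokenized_words : List String) (out : Int) : Prop := out = Count_personal_pronouns_alt tokenized_words
instance (tokenized_words : List String) (out : Int) : Decidable (Spec_Count_personal_pronouns tokenized_words out) := by unfold Spec_Count_personal_pronouns; infer_instance

-- ===== CLAIM (what is proved, stated in full; the proofs are below) =====
def Claim_equal_Count_personal_pronouns : Prop := ∀ (tokenized_words : List String), Dom_Count_personal_pronouns tokenized_words → Spec_Count_personal_pronouns tokenized_words (Count_personal_pronouns tokenized_words)

-- ===== LEMMAS AND PROOFS =====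

theorem foldl_addTerm {α : Type} (t : α → Int) (l : List α) (a : Int) :
    l.foldl (fun c x => c + t x) a = a + (l.map t).sum := by
  induction l generalizing a with
  | nil => simp
  | cons x xs ih => simp [ih, add_assoc]

theorem sum_map_sub {α : Type} (f g h : α → Int) (l : List α)
    (hp : ∀ x ∈ l, f x = g x - h x) :
    (l.map f).sum = (l.map g).sum - (l.map h).sum := by
  induction l with
  | nil => simp
  | cons x xs ih =>
    have hx := hp x (by simp)
    have := ih (fun y hy => hp y (by simp [hy]))
    simp [hx, this]; ring

theorem Count_personal_pronouns_spec : Claim_equal_Count_personal_pronouns := by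
  intro xs _
  show Count_personal_pronouns xs = Count_personal_pronouns_alt xs
  unfold Count_personal_pronouns Count_personal_pronouns_alt
  simp only []
  set pronouns : List String := ["I", "we", "my", "ours", "us"] with hpr
  -- term functions
  have hA : (fun (count : Int) (i : Int) =>
      let word := PySem.List.pyGetD xs i ""
      if word ∈ pronouns then
        if word = "us" ∧ i > 0 ∧
            PySem.Str.lower (PySem.List.pyGetD xs (i - 1) "") ∉ (["the", "in"] : List String) then
          count + 1
        else if word ≠ "us" then count + 1
        else count
      else count)
      = (fun (count : Int) (i : Int) => count +
        (let word := PySem.List.pyGetD xs i ""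
         if word ∈ pronouns then
           if word = "us" ∧ i > 0 ∧
               PySem.Str.lower (PySem.List.pyGetD xs (i - 1) "") ∉ (["the", "in"] : List String) then
             (1 : Int)
           else if word ≠ "us" then 1
           else 0
         else 0)) := by
    funext c i; dsimp only; split_ifs <;> ring
  have hT : (fun (c : Int) (w : String) => if w ∈ pronouns then c + 1 else c)
      = (fun (c : Int) (w : String) => c + (if w ∈ pronouns then (1 : Int) else 0)) := by
    funext c w; split_ifs <;> ring
  have hD : (fun (c : Int) (p : Int × String) =>
      if p.2 = "us" ∧ (p.1 = 0 ∨
          PySem.Str.lower (PySem.List.pyGetD xs (p.1 - 1) "") ∈ (["the", "in"] : List String)) then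
        c + 1
      else c)
      = (fun (c : Int) (p : Int × String) => c +
        (if p.2 = "us" ∧ (p.1 = 0 ∨
            PySem.Str.lower (PySem.List.pyGetD xs (p.1 - 1) "") ∈ (["the", "in"] : List String)) then
          (1 : Int)
        else 0)) := by
    funext c p; split_ifs <;> ring
  rw [hA, hT, hD, foldl_addTerm, foldl_addTerm, foldl_addTerm]
  simp only [zero_add]
  -- rewrite the two B-side sums as sums over the same index range
  have hTot : (xs.map (fun w => if w ∈ pronouns then (1 : Int) else 0)).sum
      = ((PySem.List.pyRange 0 (PySem.List.len xs) 1).map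
          (fun j => if PySem.List.pyGetD xs j "" ∈ pronouns then (1 : Int) else 0)).sum := by
    conv_lhs => rw [← PySem.List.map_pyGetD_pyRange_zero xs ""]
    rw [List.map_map]; rfl
  have hDis : ((PySem.List.enumerate xs 0).map
        (fun p : Int × String => if p.2 = "us" ∧ (p.1 = 0 ∨
            PySem.Str.lower (PySem.List.pyGetD xs (p.1 - 1) "") ∈ (["the", "in"] : List String)) then
          (1 : Int) else 0)).sum
      = ((PySem.List.pyRange 0 (PySem.List.len xs) 1).map
          (fun j => if PySem.List.pyGetD xs j "" = "us" ∧ (j = 0 ∨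
            PySem.Str.lower (PySem.List.pyGetD xs (j - 1) "") ∈ (["the", "in"] : List String)) then
          (1 : Int) else 0)).sum := by
    rw [PySem.List.enumerate_eq_map_pyRange (d := "")]
    rw [List.map_map]; rfl
  rw [hTot, hDis]
  apply sum_map_sub
  intro j hj
  rw [PySem.List.mem_pyRange_one] at hj
  obtain ⟨hj0, -⟩ := hj
  show _ = _
  simp only [hpr]
  by_cases hus : PySem.List.pyGetD xs j "" = "us"
  · rw [hus]
    by_cases h0 : j = 0
    · subst h0; simp
    · have hjpos : (0 : Int) < j := lt_of_le_of_ne hj0 (Ne.symm h0)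
      by_cases hin : PySem.Str.lower (PySem.List.pyGetD xs (j - 1) "") ∈ (["the", "in"] : List String)
      · simp [hin, h0]
      · simp [hin, h0, hjpos]
  · by_cases hmem : PySem.List.pyGetD xs j "" ∈ (["I", "we", "my", "ours", "us"] : List String)
    · simp [hmem, hus]
    · simp [hmem, hus]

-- ===== VERDICT (by name: the statement is the Claim_ definition above) =====
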